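-- pv_equiv track=rewrite | github.com/mr-doop/mlb-parlay-picker | app.py | is_allowed_market
-- ===== SOURCE A (Python) =====
-- def is_allowed_market(cat: str):
--     if not isinstance(cat,str): return False
--     c = cat.strip().lower()
--     for k in ALLOWED_MARKETS:
--         if c == k.lower():
--             return True
--     # soft mapping for your internal strings
--     # e.g., "Pitcher Ks" -> Pitcher Strikeouts
--     if "strikeout" in c: return True
--     if "outs" in c: return True
--     if "walk" in c: return True
--     if "win" in c: return True
--     return False
--
-- ALLOWED_MARKETS = {
--     "Pitcher Win", "Pitcher Wins", "pitcher_record_a_win",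
--     "Pitcher Outs", "pitcher_outs",
--     "Pitcher Strikeouts", "pitcher_strikeouts",
--     "Pitcher Walks", "pitcher_walks",
-- }
-- ===== SOURCE B (Python) =====
-- def is_allowed_market(cat: str):
--     if not isinstance(cat, str):
--         return False
--     c = cat.strip().lower()
--     return any(tok in c for tok in ("strikeout", "outs", "walk", "win"))
-- ===== Notes on version B (the rewrite author's own statement) =====
-- stated objective: simpler
-- what changed: Drops the whitelist-membership loop entirely (every lowercased whitelist entry already contains one of the four tokens) and folds the four substring ifs into a single any() over the tokens.
import Mathlib
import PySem

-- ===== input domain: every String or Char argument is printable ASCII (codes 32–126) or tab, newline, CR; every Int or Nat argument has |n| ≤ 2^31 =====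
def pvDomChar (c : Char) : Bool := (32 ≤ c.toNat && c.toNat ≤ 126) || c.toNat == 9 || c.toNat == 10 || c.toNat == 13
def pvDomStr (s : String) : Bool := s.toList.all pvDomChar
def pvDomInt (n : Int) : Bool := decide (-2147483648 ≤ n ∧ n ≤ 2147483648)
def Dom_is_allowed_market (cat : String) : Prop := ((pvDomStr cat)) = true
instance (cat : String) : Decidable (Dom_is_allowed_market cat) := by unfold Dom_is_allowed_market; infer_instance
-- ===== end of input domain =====

-- B replaces A's redundant whitelist loop + four substring ifs by a single any() over the four tokens (simpler decomposition, same results).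


-- ===== PORT A =====
-- the module constant ALLOWED_MARKETS (a set literal; iteration order does not affect the result, only whether some entry matches)
def allowedMarkets : List String :=
  ["Pitcher Win", "Pitcher Wins", "pitcher_record_a_win",
   "Pitcher Outs", "pitcher_outs",
   "Pitcher Strikeouts", "pitcher_strikeouts",
   "Pitcher Walks", "pitcher_walks"]

-- the for-loop with early return, then the four substring ifs A falls through to
def amLoop (c : String) : List String → Bool
  | [] =>
      if PySem.Str.isIn "strikeout" c then true
      else if PySem.Str.isIn "outs" c then true
      else if PySem.Str.isIn "walk" c then true
      else if PySem.Str.isIn "win" c then true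
      else false
  | k :: rest => if c == PySem.Str.lower k then true else amLoop c rest

def is_allowed_market (cat : String) : Bool :=
  let c := PySem.Str.lower (PySem.Str.strip cat)
  amLoop c allowedMarkets

-- ===== PORT B =====
def is_allowed_market_alt (cat : String) : Bool :=
  let c := PySem.Str.lower (PySem.Str.strip cat)
  ["strikeout", "outs", "walk", "win"].any (fun tok => PySem.Str.isIn tok c)

-- ===== PRECONDITION & SPEC =====
def Spec_is_allowed_market (cat : String) (out : Bool) : Prop := out = is_allowed_market_alt cat
instance (cat : String) (out : Bool) : Decidable (Spec_is_allowed_market cat out) := by unfold Spec_is_allowed_market; infer_instance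

-- ===== CLAIM (what is proved, stated in full; the proofs are below) =====
def Claim_equal_is_allowed_market : Prop := ∀ (cat : String), Dom_is_allowed_market cat → Spec_is_allowed_market cat (is_allowed_market cat)

-- ===== LEMMAS AND PROOFS =====

-- B's any over the four tokens, as a plain disjunction
theorem alt_any_eq (c : String) :
    (["strikeout", "outs", "walk", "win"].any (fun tok => PySem.Str.isIn tok c)) =
      (PySem.Str.isIn "strikeout" c || PySem.Str.isIn "outs" c ||
       PySem.Str.isIn "walk" c || PySem.Str.isIn "win" c) := by
  simp [List.any, Bool.or_assoc]

-- A's loop over the whitelist returns B's token test: each lowercased entry itself contains a token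
theorem amLoop_eq (c : String) :
    amLoop c allowedMarkets =
      (["strikeout", "outs", "walk", "win"].any (fun tok => PySem.Str.isIn tok c)) := by
  rw [alt_any_eq]
  unfold allowedMarkets
  simp only [amLoop]
  by_cases h1 : c = PySem.Str.lower "Pitcher Win"
  · subst h1; decide
  by_cases h2 : c = PySem.Str.lower "Pitcher Wins"
  · subst h2; decide
  by_cases h3 : c = PySem.Str.lower "pitcher_record_a_win"
  · subst h3; decide
  by_cases h4 : c = PySem.Str.lower "Pitcher Outs"
  · subst h4; decide
  by_cases h5 : c = PySem.Str.lower "pitcher_outs"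
  · subst h5; decide
  by_cases h6 : c = PySem.Str.lower "Pitcher Strikeouts"
  · subst h6; decide
  by_cases h7 : c = PySem.Str.lower "pitcher_strikeouts"
  · subst h7; decide
  by_cases h8 : c = PySem.Str.lower "Pitcher Walks"
  · subst h8; decide
  by_cases h9 : c = PySem.Str.lower "pitcher_walks"
  · subst h9; decide
  rw [if_neg (by simp [h1]), if_neg (by simp [h2]), if_neg (by simp [h3]),
      if_neg (by simp [h4]), if_neg (by simp [h5]), if_neg (by simp [h6]),
      if_neg (by simp [h7]), if_neg (by simp [h8]), if_neg (by simp [h9])]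
  cases PySem.Str.isIn "strikeout" c <;> cases PySem.Str.isIn "outs" c <;>
    cases PySem.Str.isIn "walk" c <;> cases PySem.Str.isIn "win" c <;> rfl

-- ===== VERDICT (by name: the statement is the Claim_ definition above) =====
theorem is_allowed_market_spec : Claim_equal_is_allowed_market := by
  intro cat _
  unfold Spec_is_allowed_market is_allowed_market is_allowed_market_alt
  exact amLoop_eq _
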